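-- pv_equiv track=rewrite | github.com/bihealth/StemCNV-check | scripts/py_helpers.py | collect_SNP_cluster_ids
-- ===== SOURCE A (Python) =====
-- def collect_SNP_cluster_ids(sample_id, config_extra_samples, sample_data_full):
--     ids = []
--     # '__[column]' entries: take all sample_ids with the same value in '[column]'
--     col_val_match = [sampledef[2:] for sampledef in config_extra_samples if sampledef[:2] == '__']
--     for col in col_val_match:
--         if col not in sample_data_full[0].keys():
--             raise ConfigValueError('Config for SNP clustering refers to non-existing column: ' + col)
--         match_val = [dictline[col] for dictline in sample_data_full if dictline['Sample_ID'] == sample_id][0]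
--         ids += [dictline['Sample_ID'] for dictline in sample_data_full if dictline[col] == match_val]
--     # '_[column]' entry: take all sample_ids from '[column]'
--     id_cols = [sampledef[1:] for sampledef in config_extra_samples if sampledef[0] == '_' and sampledef[:2] != '__']
--     for col in id_cols:
--         if col not in sample_data_full[0].keys():
--             raise ConfigValueError('Config for SNP clustering refers to non-existing column: ' + col)
--         ids += [dictline[col] for dictline in sample_data_full if dictline['Sample_ID'] == sample_id][0].split(',')
--     # other entries: assume they are sample_ids & use them as is
--     ids += [sampledef for sampledef in config_extra_samples if sampledef[0] != '_']
--
--     return ids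
-- ===== SOURCE B (Python) =====
-- class ConfigValueError(ValueError):
--     pass
--
--
-- def collect_SNP_cluster_ids(sample_id, config_extra_samples, sample_data_full):
--     # Transposed traversal: one classification pass over the config, then a SINGLE
--     # row-major pass over sample_data_full fills one bucket per '__' column,
--     # instead of A's column-major repeated scans of the whole table.
--     match_cols, id_cols, plain_ids = [], [], []
--     for entry in config_extra_samples:
--         if entry[:2] == '__':
--             match_cols.append(entry[2:])
--         elif entry[:1] == '_':
--             id_cols.append(entry[1:])
--         else:
--             plain_ids.append(entry)
--
--     if not match_cols and not id_cols:
--         return plain_ids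
--
--     header = sample_data_full[0]
--     for col in match_cols + id_cols:
--         if col not in header:
--             raise ConfigValueError('Config for SNP clustering refers to non-existing column: ' + col)
--
--     my_row = next(r for r in sample_data_full if r['Sample_ID'] == sample_id)
--     targets = [my_row[c] for c in match_cols]
--     buckets = [[] for _ in match_cols]
--     for row in sample_data_full:
--         sid = row['Sample_ID']
--         for i in range(len(match_cols)):
--             if row[match_cols[i]] == targets[i]:
--                 buckets[i].append(sid)
--
--     ids = [x for b in buckets for x in b]
--     for col in id_cols:
--         ids += my_row[col].split(',')
--     return ids + plain_ids
-- ===== Notes on version B (the rewrite author's own statement) =====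
-- stated objective: alternative
-- what changed: B transposes A's loop nest: after one classification pass over the config it makes a SINGLE row-major pass over sample_data_full, maintaining one bucket of matching Sample_IDs per '__' column, and concatenates the buckets afterwards, where A makes a separate full column-major scan of the table (plus an extra scan for the sample's own row) for every configured column.
import Mathlib
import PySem

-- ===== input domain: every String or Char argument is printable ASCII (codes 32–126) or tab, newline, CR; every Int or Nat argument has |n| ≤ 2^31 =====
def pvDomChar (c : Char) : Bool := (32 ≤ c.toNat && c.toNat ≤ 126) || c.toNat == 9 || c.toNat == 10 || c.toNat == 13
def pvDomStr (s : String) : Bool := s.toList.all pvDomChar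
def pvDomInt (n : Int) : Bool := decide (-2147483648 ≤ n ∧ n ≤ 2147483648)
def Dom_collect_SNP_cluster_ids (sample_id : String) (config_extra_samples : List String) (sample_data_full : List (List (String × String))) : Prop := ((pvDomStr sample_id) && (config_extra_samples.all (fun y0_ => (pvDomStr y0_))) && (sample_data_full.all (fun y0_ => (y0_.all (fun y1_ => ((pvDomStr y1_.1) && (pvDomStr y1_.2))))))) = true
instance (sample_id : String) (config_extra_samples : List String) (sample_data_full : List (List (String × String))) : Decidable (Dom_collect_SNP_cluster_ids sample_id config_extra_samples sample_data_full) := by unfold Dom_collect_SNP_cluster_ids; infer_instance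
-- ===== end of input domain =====

-- B transposes A's loop nest: one classification pass over the config, then a SINGLE row-major
-- pass over sample_data_full filling one bucket of matching Sample_IDs per '__' column, where A
-- makes a separate column-major scan of the whole table per configured column; return value only.

-- shared small helpers: dict (assoc-list) first-match lookup and keys() membership
def pvGet? (r : List (String × String)) (k : String) : Option String :=
  (r.find? (fun p => p.1 == k)).map (·.2)

-- dictline[k]: Python raises KeyError when absent; the default "" is unreached under Pre_
def pvGet (r : List (String × String)) (k : String) : String := (pvGet? r k).getD ""

def pvHasKey (r : List (String × String)) (k : String) : Bool := (r.map (·.1)).contains k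

-- ===== PORT A =====
-- sampledef[:2] == '__'
def pvIsM (s : String) : Bool := PySem.Str.slice s none (some 2) == "__"
-- sampledef[0] == '_' (IndexError on '' in Python; default '?' unreached under Pre_)
def pvIsU (s : String) : Bool := (PySem.Str.pyGet? s 0).getD '?' == '_'
-- col_val_match = [sampledef[2:] for sampledef in config if sampledef[:2] == '__']
def pvMcols (ces : List String) : List String :=
  (ces.filter pvIsM).map (fun s => PySem.Str.slice s (some 2) none)
-- id_cols = [sampledef[1:] for sampledef in config if sampledef[0] == '_' and sampledef[:2] != '__']
def pvIcols (ces : List String) : List String :=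
  (ces.filter (fun s => pvIsU s && !(pvIsM s))).map (fun s => PySem.Str.slice s (some 1) none)

def collect_SNP_cluster_ids (sample_id : String) (config_extra_samples : List String) (sample_data_full : List (List (String × String))) : List String :=
  -- ids = []; two column loops; then the plain entries (the 'raise' branches keep ids unchanged: unreached under Pre_)
  ((pvIcols config_extra_samples).foldl
    (fun ids col =>
      if !(pvHasKey (sample_data_full.headD []) col) then ids
      else ids ++ (PySem.Str.split? (((sample_data_full.filter (fun r => pvGet r "Sample_ID" == sample_id)).map (fun r => pvGet r col)).headD "") ",").getD [])
    ((pvMcols config_extra_samples).foldl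
      (fun ids col =>
        if !(pvHasKey (sample_data_full.headD []) col) then ids
        else
          let match_val := ((sample_data_full.filter (fun r => pvGet r "Sample_ID" == sample_id)).map (fun r => pvGet r col)).headD ""
          ids ++ (sample_data_full.filter (fun r => pvGet r col == match_val)).map (fun r => pvGet r "Sample_ID"))
      []))
  ++ config_extra_samples.filter (fun s => !(pvIsU s))

-- ===== PORT B =====
-- one pass over config_extra_samples: (match_cols, id_cols, plain_ids)
def pvClassify (ces : List String) : List String × List String × List String :=
  ces.foldl
    (fun acc s =>
      if PySem.Str.slice s none (some 2) == "__" then (acc.1 ++ [PySem.Str.slice s (some 2) none], acc.2.1, acc.2.2)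
      else if PySem.Str.slice s none (some 1) == "_" then (acc.1, acc.2.1 ++ [PySem.Str.slice s (some 1) none], acc.2.2)
      else (acc.1, acc.2.1, acc.2.2 ++ [s]))
    ([], [], [])

def collect_SNP_cluster_ids_alt (sample_id : String) (config_extra_samples : List String) (sample_data_full : List (List (String × String))) : List String :=
  let cl := pvClassify config_extra_samples
  let mcols := cl.1
  let icols := cl.2.1
  let plain := cl.2.2
  if mcols.isEmpty && icols.isEmpty then plain
  else
    let header := sample_data_full.headD []   -- sample_data_full[0] (IndexError on [] unreached under Pre_)
    if (mcols ++ icols).any (fun c => !(pvHasKey header c)) then []   -- raise ConfigValueError: unreached under Pre_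
    else
      let my_row := (sample_data_full.find? (fun r => pvGet r "Sample_ID" == sample_id)).getD []   -- next(...)
      -- match_cols[i] and targets[i] are traversed together: model the indexed pair as a zip
      let pairs := mcols.map (fun c => (c, pvGet my_row c))
      -- the single row-major pass: each row appends its Sample_ID to every bucket whose column value matches
      let buckets := sample_data_full.foldl
        (fun bs row =>
          List.zipWith (fun b ct => if pvGet row ct.1 == ct.2 then b ++ [pvGet row "Sample_ID"] else b) bs pairs)
        (pairs.map (fun _ => ([] : List String)))
      (icols.foldl (fun ids col => ids ++ (PySem.Str.split? (pvGet my_row col) ",").getD []) buckets.flatten) ++ plain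

-- ===== PRECONDITION & SPEC =====
-- Pre_ = exactly the inputs where the Python A returns: every config entry nonempty (''
-- hits sampledef[0] → IndexError), and as soon as some '_'/'__' column is configured:
-- a first row exists, every row has 'Sample_ID', some row matches sample_id (else the [...][0]
-- raises IndexError), every '__'-column is in the first row and all rows, and every '_'-column
-- is in the first row and in all rows matching sample_id (others are never subscripted by A).
def Pre_collect_SNP_cluster_ids (sample_id : String) (config_extra_samples : List String) (sample_data_full : List (List (String × String))) : Prop :=
  (∀ s ∈ config_extra_samples, s ≠ "") ∧
  ((pvMcols config_extra_samples ≠ [] ∨ pvIcols config_extra_samples ≠ []) →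
    sample_data_full ≠ [] ∧
    (∀ r ∈ sample_data_full, pvHasKey r "Sample_ID" = true) ∧
    (∃ r ∈ sample_data_full, pvGet r "Sample_ID" = sample_id) ∧
    (∀ c ∈ pvMcols config_extra_samples,
      pvHasKey (sample_data_full.headD []) c = true ∧ ∀ r ∈ sample_data_full, pvHasKey r c = true) ∧
    (∀ c ∈ pvIcols config_extra_samples,
      pvHasKey (sample_data_full.headD []) c = true ∧
      ∀ r ∈ sample_data_full, pvGet r "Sample_ID" = sample_id → pvHasKey r c = true))
instance (sample_id : String) (config_extra_samples : List String) (sample_data_full : List (List (String × String))) : Decidable (Pre_collect_SNP_cluster_ids sample_id config_extra_samples sample_data_full) := by unfold Pre_collect_SNP_cluster_ids; infer_instance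

def pvWitness_collect_SNP_cluster_ids : String × List String × (List (List (String × String))) :=
  ("s1", ["__grp", "_rel", "x"],
   [[("Sample_ID", "s1"), ("grp", "a"), ("rel", "s2,s3")],
    [("Sample_ID", "s2"), ("grp", "a"), ("rel", "")]])

def Spec_collect_SNP_cluster_ids (sample_id : String) (config_extra_samples : List String) (sample_data_full : List (List (String × String))) (out : List String) : Prop := out = collect_SNP_cluster_ids_alt sample_id config_extra_samples sample_data_full
instance (sample_id : String) (config_extra_samples : List String) (sample_data_full : List (List (String × String))) (out : List String) : Decidable (Spec_collect_SNP_cluster_ids sample_id config_extra_samples sample_data_full out) := by unfold Spec_collect_SNP_cluster_ids; infer_instance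

-- ===== CLAIM (what is proved, stated in full; the proofs are below) =====
def Claim_equal_collect_SNP_cluster_ids : Prop := ∀ (sample_id : String) (config_extra_samples : List String) (sample_data_full : List (List (String × String))), Dom_collect_SNP_cluster_ids sample_id config_extra_samples sample_data_full → Pre_collect_SNP_cluster_ids sample_id config_extra_samples sample_data_full → Spec_collect_SNP_cluster_ids sample_id config_extra_samples sample_data_full (collect_SNP_cluster_ids sample_id config_extra_samples sample_data_full)

-- ===== LEMMAS AND PROOFS =====

-- s[0] == '_' (with unreachable default) coincides with s[:1] == '_' on every string
theorem pvIsU_eq_slice1 (s : String) :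
    pvIsU s = (PySem.Str.slice s none (some 1) == "_") := by
  simp only [pvIsU, PySem.Str.slice, PySem.Str.pyGet?, PySem.Chars.slice_eq_listSlice,
    PySem.Chars.pyGet?_eq_listPyGet?]
  rcases h : s.toList with _ | ⟨c, t⟩ <;>
    simp [Bool.beq_eq_decide_eq, String.ext_iff, PySem.List.pyGet?, PySem.List.pyIdx?,
      PySem.List.slice, PySem.List.clampIdx]

-- s[:2] == '__' forces s[0] == '_'
theorem pvIsU_of_pvIsM (s : String) (h2 : pvIsM s = true) : pvIsU s = true := by
  simp only [pvIsM, PySem.Str.slice, PySem.Chars.slice_eq_listSlice, beq_iff_eq,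
    String.ext_iff] at h2
  simp only [pvIsU, PySem.Str.pyGet?, PySem.Chars.pyGet?_eq_listPyGet?]
  rcases h : s.toList with _ | ⟨c, _ | ⟨d, u⟩⟩ <;> rw [h] at h2 <;>
    simp_all [PySem.List.pyGet?, PySem.List.pyIdx?, PySem.List.slice, PySem.List.clampIdx] <;>
    rw [if_pos (by positivity)] <;> simp

-- B's single classification pass = A's three comprehensions
def pvStep (acc : List String × List String × List String) (s : String) : List String × List String × List String :=
  if pvIsM s then (acc.1 ++ [PySem.Str.slice s (some 2) none], acc.2.1, acc.2.2)
  else if pvIsU s then (acc.1, acc.2.1 ++ [PySem.Str.slice s (some 1) none], acc.2.2)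
  else (acc.1, acc.2.1, acc.2.2 ++ [s])

theorem pvStep_eq :
    (fun (acc : List String × List String × List String) s =>
      if PySem.Str.slice s none (some 2) == "__" then (acc.1 ++ [PySem.Str.slice s (some 2) none], acc.2.1, acc.2.2)
      else if PySem.Str.slice s none (some 1) == "_" then (acc.1, acc.2.1 ++ [PySem.Str.slice s (some 1) none], acc.2.2)
      else (acc.1, acc.2.1, acc.2.2 ++ [s]))
    = pvStep := by
  funext acc s
  rw [pvStep, ← pvIsU_eq_slice1 s]
  rfl

theorem pvClassify_spec (ces : List String) (a b c : List String) :
    ces.foldl pvStep (a, b, c)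
    = (a ++ pvMcols ces, b ++ pvIcols ces, c ++ ces.filter (fun s => !(pvIsU s))) := by
  induction ces generalizing a b c with
  | nil => simp [pvMcols, pvIcols]
  | cons s tl ih =>
    rw [List.foldl_cons, pvStep]
    by_cases hM : pvIsM s = true
    · have hU := pvIsU_of_pvIsM s hM
      simp only [hM, hU, if_true]
      rw [ih]
      simp [pvMcols, pvIcols, hM, pvIsU_of_pvIsM s hM]
    · have hM' : pvIsM s = false := by simpa using hM
      by_cases hU : pvIsU s = true
      · simp only [hM', hU, Bool.false_eq_true, if_false, if_true]
        rw [ih]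
        simp [pvMcols, pvIcols, hM', hU]
      · have hU' : pvIsU s = false := by simpa using hU
        simp only [hM', hU', Bool.false_eq_true, if_false]
        rw [ih]
        simp [pvMcols, pvIcols, hM', hU']

-- [f(r) for r in l if p(r)][0] = f(first r with p(r))
theorem headD_map_filter_find {α β : Type} (l : List α) (p : α → Bool) (f : α → β) (d : β)
    (r0 : α) (h : l.find? p = some r0) : ((l.filter p).map f).headD d = f r0 := by
  induction l with
  | nil => simp at h
  | cons x t ih =>
    by_cases hp : p x = true
    · rw [List.find?_cons_of_pos hp] at h
      injection h with h
      subst h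
      simp [hp]
    · have hp' : p x = false := by simpa using hp
      rw [List.find?_cons_of_neg (by simp [hp'])] at h
      rw [List.filter_cons]
      simp only [hp', Bool.false_eq_true, if_false]
      exact ih h

-- zipWith composed with zipWith over the same right list
theorem zipWith_zipWith_same {α β γ δ : Type} (f : γ → β → δ) (g : α → β → γ)
    (as : List α) (bs : List β) :
    List.zipWith f (List.zipWith g as bs) bs = List.zipWith (fun a b => f (g a b) b) as bs := by
  induction as generalizing bs with
  | nil => simp
  | cons a t ih => cases bs <;> simp [ih]

-- zipWith with the left element kept is the identity when the left list is not longer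
theorem zipWith_left_of_le {α β : Type} (as : List α) (bs : List β) (h : as.length ≤ bs.length) :
    List.zipWith (fun a _ => a) as bs = as := by
  induction as generalizing bs with
  | nil => simp
  | cons a t ih => cases bs with
    | nil => simp at h
    | cons b u => simpa using ih u (by simpa using h)

-- the row-major bucket fold = per-pair column-major filters
theorem bucket_fold (rows : List (List (String × String))) (pairs : List (String × String))
    (b0 : List (List String)) (h : b0.length = pairs.length) :
    rows.foldl
      (fun bs row =>
        List.zipWith (fun b ct => if pvGet row ct.1 == ct.2 then b ++ [pvGet row "Sample_ID"] else b) bs pairs)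
      b0
    = List.zipWith
        (fun b ct => b ++ (rows.filter (fun r => pvGet r ct.1 == ct.2)).map (fun r => pvGet r "Sample_ID"))
        b0 pairs := by
  induction rows generalizing b0 with
  | nil =>
    simp only [List.foldl_nil, List.filter_nil, List.map_nil, List.append_nil]
    exact (zipWith_left_of_le b0 pairs (le_of_eq h)).symm
  | cons r rows ih =>
    rw [List.foldl_cons, ih _ (by simp [h]), zipWith_zipWith_same]
    congr 1
    funext b ct
    rw [List.filter_cons]
    by_cases hc : (pvGet r ct.1 == ct.2) = true <;> simp [hc]

-- the if-guarded append loop, when the guard never fires, is init ++ flatMap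
theorem foldl_guard {α : Type} (l : List String) (k : String → Bool) (g : String → List α)
    (init : List α) (h : ∀ c ∈ l, k c = true) :
    l.foldl (fun ids c => if !(k c) then ids else ids ++ g c) init = init ++ l.flatMap g := by
  have h2 : l.foldl (fun ids c => if !(k c) then ids else ids ++ g c) init
      = l.foldl (fun ids c => ids ++ g c) init :=
    PySem.List.foldl_congr_mem l _ _ init (by intro acc x hx; simp [h x hx])
  rw [h2, PySem.List.foldl_append_eq_flatMap]

-- ===== VERDICT (by name: the statement is the Claim_ definition above) =====
theorem collect_SNP_cluster_ids_spec : Claim_equal_collect_SNP_cluster_ids := by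
  intro sample_id ces sdf _hdom hpre
  unfold Spec_collect_SNP_cluster_ids
  obtain ⟨_hne, hrest⟩ := hpre
  unfold collect_SNP_cluster_ids collect_SNP_cluster_ids_alt pvClassify
  rw [pvStep_eq]
  by_cases hMI : pvMcols ces = [] ∧ pvIcols ces = []
  · obtain ⟨hm, hi⟩ := hMI
    simp [pvClassify_spec, hm, hi]
  · obtain ⟨hnil, _hSID, hex, hMc, hIc⟩ := hrest (by tauto)
    obtain ⟨r1, hr1mem, hr1⟩ := hex
    have hfind : (sdf.find? (fun r => pvGet r "Sample_ID" == sample_id)).isSome := by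
      rw [List.find?_isSome]
      exact ⟨r1, hr1mem, by simp [hr1]⟩
    obtain ⟨r0, hr0⟩ := Option.isSome_iff_exists.mp hfind
    have hmy : (sdf.find? (fun r => pvGet r "Sample_ID" == sample_id)).getD [] = r0 := by
      simp [hr0]
    have hif : ((pvMcols ces).isEmpty && (pvIcols ces).isEmpty) = false := by
      cases hM : (pvMcols ces).isEmpty <;> cases hI : (pvIcols ces).isEmpty <;>
        simp_all [List.isEmpty_iff]
    have hanyM : ((pvMcols ces).any (fun c => !(pvHasKey (sdf.headD []) c))) = false := by
      rw [List.any_eq_false]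
      intro c hc
      simp only [(hMc c hc).1, Bool.not_true, Bool.false_eq_true, not_false_eq_true]
    have hanyI : ((pvIcols ces).any (fun c => !(pvHasKey (sdf.headD []) c))) = false := by
      rw [List.any_eq_false]
      intro c hc
      simp only [(hIc c hc).1, Bool.not_true, Bool.false_eq_true, not_false_eq_true]
    -- A side: replace the [...][0] lookups by the first matching row r0, then drop the
    -- (never-taken) missing-column branches and flatten both loops
    have hbody1 :
        (fun (ids : List String) col =>
          if !(pvHasKey (sdf.headD []) col) then ids
          else
            let match_val := ((sdf.filter (fun r => pvGet r "Sample_ID" == sample_id)).map (fun r => pvGet r col)).headD ""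
            ids ++ (sdf.filter (fun r => pvGet r col == match_val)).map (fun r => pvGet r "Sample_ID"))
        = (fun (ids : List String) col =>
          if !(pvHasKey (sdf.headD []) col) then ids
          else ids ++ (sdf.filter (fun r => pvGet r col == pvGet r0 col)).map (fun r => pvGet r "Sample_ID")) := by
      funext ids col
      rw [headD_map_filter_find sdf _ (fun r => pvGet r col) "" r0 hr0]
    have hbody2 :
        (fun (ids : List String) col =>
          if !(pvHasKey (sdf.headD []) col) then ids
          else ids ++ (PySem.Str.split? (((sdf.filter (fun r => pvGet r "Sample_ID" == sample_id)).map (fun r => pvGet r col)).headD "") ",").getD [])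
        = (fun (ids : List String) col =>
          if !(pvHasKey (sdf.headD []) col) then ids
          else ids ++ (PySem.Str.split? (pvGet r0 col) ",").getD []) := by
      funext ids col
      rw [headD_map_filter_find sdf _ (fun r => pvGet r col) "" r0 hr0]
    rw [hbody1, hbody2,
      foldl_guard (pvMcols ces) (pvHasKey (sdf.headD [])) _ [] (fun c hc => (hMc c hc).1),
      foldl_guard (pvIcols ces) (pvHasKey (sdf.headD [])) _ _ (fun c hc => (hIc c hc).1),
      List.nil_append]
    -- B side: zeta-reduce the lets, kill the two guards, and turn the row-major bucket
    -- pass into the per-column filters via bucket_fold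
    simp only [pvClassify_spec, List.nil_append, hif, hmy, Bool.false_eq_true, if_false,
      List.any_append, hanyM, hanyI, Bool.or_self,
      PySem.List.foldl_append_eq_flatMap]
    rw [bucket_fold sdf ((pvMcols ces).map (fun c => (c, pvGet r0 c))) _ (by simp),
      List.zipWith_map_left, List.zipWith_self, ← List.flatMap_def, List.flatMap_map]
    simp
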